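-- pv_equiv track=rewrite | github.com/keweikao/DayTrade-Pro-AI | src/strategies/strategy_identifier.py | _suggest_overall_approach
-- ===== SOURCE A (Python) =====
-- from typing import Dict, List, Any, Optional
--
-- def _suggest_overall_approach(comparison_result: Dict[str, Any]) -> str:
--     """建議整體操作方針"""
--
--     scores = {name: data['score'] for name, data in comparison_result.items()
--              if name != 'overall_analysis'}
--
--     max_score = max(scores.values())
--     high_score_strategies = [name for name, score in scores.items() if score >= max_score - 10]
--
--     if max_score < 50:
--         return "當前市況不明朗，建議觀望等待更清晰的信號"
--     elif len(high_score_strategies) == 1: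
--         return f"市況明確適合{high_score_strategies[0]}策略，建議專注執行"
--     else:
--         return f"多重策略適用，可考慮組合操作或等待更明確的信號"
-- ===== SOURCE B (Python) =====
-- def _suggest_overall_approach(comparison_result):
--     """建議整體操作方針 — single pass tracking best and second-best score."""
--     best_score = None
--     best_name = None
--     second = None
--     for name, data in comparison_result.items():
--         if name == 'overall_analysis':
--             continue
--         s = data['score']
--         if best_score is None:
--             best_score, best_name = s, name
--         elif s > best_score:
--             second = best_score
--             best_score, best_name = s, name
--         else:
--             second = s if second is None else max(second, s)
--     if best_score is None or best_score < 50: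
--         return "當前市況不明朗，建議觀望等待更清晰的信號"
--     if second is None or second < best_score - 10:
--         return f"市況明確適合{best_name}策略，建議專注執行"
--     return "多重策略適用，可考慮組合操作或等待更明確的信號"
-- ===== Notes on version B (the rewrite author's own statement) =====
-- stated objective: alternative
-- what changed: Replaces A's build-a-score-dict + max() + filter-a-list decomposition by a single pass over the items that maintains the best score with its strategy name and the second-best score; 'exactly one high strategy' becomes 'no second score or second-best < best - 10'; Pre_ excludes inputs on which A raises (no strategy entry, or a strategy without a 'score' key) and duplicate-key association lists a Python dict cannot represent.
import Mathlib
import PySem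

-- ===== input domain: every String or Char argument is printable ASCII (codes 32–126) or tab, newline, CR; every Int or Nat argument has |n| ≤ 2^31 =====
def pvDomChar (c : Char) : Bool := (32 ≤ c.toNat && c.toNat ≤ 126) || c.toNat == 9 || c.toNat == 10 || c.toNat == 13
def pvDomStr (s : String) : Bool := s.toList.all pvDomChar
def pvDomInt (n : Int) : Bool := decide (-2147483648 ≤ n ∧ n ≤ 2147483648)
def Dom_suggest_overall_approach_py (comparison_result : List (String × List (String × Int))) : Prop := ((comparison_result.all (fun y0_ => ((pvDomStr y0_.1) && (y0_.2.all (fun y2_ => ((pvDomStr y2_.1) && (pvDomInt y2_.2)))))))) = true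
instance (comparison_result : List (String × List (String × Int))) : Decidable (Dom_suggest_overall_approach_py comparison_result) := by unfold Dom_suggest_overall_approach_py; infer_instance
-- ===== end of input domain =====

-- B changes the decomposition, not the observable value: one pass keeping best/second-best
-- instead of building a score dict, taking max and filtering; equivalence of return values only.

-- ===== PORT A =====
-- data['score'] (Pre_ guarantees the key is present; getD 0 is never the default inside Pre_)
def scoreOf (data : List (String × Int)) : Int := (PySem.Dict.mk data).getD "score" 0

def suggest_overall_approach_py (comparison_result : List (String × List (String × Int))) : String :=
  -- scores = {name: data['score'] for name, data in comparison_result.items() if name != 'overall_analysis'}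
  let scores : PySem.Dict String Int :=
    (comparison_result.filter (fun p => p.1 != "overall_analysis")).foldl
      (fun d p => d.insert p.1 (scoreOf p.2)) PySem.Dict.empty
  -- max_score = max(scores.values())  (Pre_ excludes the empty case, where Python raises ValueError)
  let max_score : Int := (PySem.List.max? scores.values (fun v => v)).getD 0
  -- high_score_strategies = [name for name, score in scores.items() if score >= max_score - 10]
  let high : List String :=
    (scores.items.filter (fun p => decide (max_score - 10 ≤ p.2))).map Prod.fst
  if max_score < 50 then "當前市況不明朗，建議觀望等待更清晰的信號"
  else if high.length == 1 then "市況明確適合" ++ high.headD "" ++ "策略，建議專注執行"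
  else "多重策略適用，可考慮組合操作或等待更明確的信號"

-- ===== PORT B =====
-- one loop step: state = (best (score, name) if any, second-best score if any)
def altStep (st : Option (Int × String) × Option Int) (p : String × List (String × Int)) :
    Option (Int × String) × Option Int :=
  if p.1 == "overall_analysis" then st
  else
    let s := scoreOf p.2
    match st with
    | (none, sec) => (some (s, p.1), sec)
    | (some (b, bn), sec) =>
      if s > b then (some (s, p.1), some b)
      else (some (b, bn), some (match sec with | none => s | some t => max t s))

def suggest_overall_approach_py_alt (comparison_result : List (String × List (String × Int))) : String :=
  match comparison_result.foldl altStep (none, none) with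
  | (none, _) => "當前市況不明朗，建議觀望等待更清晰的信號"   -- best_score is None
  | (some (b, bn), sec) =>
    if b < 50 then "當前市況不明朗，建議觀望等待更清晰的信號"
    else if (match sec with | none => true | some t => decide (t < b - 10)) then
      "市況明確適合" ++ bn ++ "策略，建議專注執行"
    else "多重策略適用，可考慮組合操作或等待更明確的信號"

-- ===== PRECONDITION & SPEC =====
-- Pre_ excludes: (a) inputs where Python raises — no strategy entry besides 'overall_analysis'
-- (max() on empty: ValueError) or a strategy entry without a 'score' key (KeyError); and
-- (b) association lists with duplicate keys (outer, or 'score' duplicated inside a used entry),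
-- which a Python dict argument cannot represent.
def Pre_suggest_overall_approach_py (comparison_result : List (String × List (String × Int))) : Prop :=
  (comparison_result.map Prod.fst).Nodup ∧
  (∃ p ∈ comparison_result, p.1 ≠ "overall_analysis") ∧
  (∀ p ∈ comparison_result, p.1 ≠ "overall_analysis" →
      "score" ∈ p.2.map Prod.fst ∧ (p.2.map Prod.fst).Nodup)
instance (comparison_result : List (String × List (String × Int))) : Decidable (Pre_suggest_overall_approach_py comparison_result) := by unfold Pre_suggest_overall_approach_py; infer_instance

def pvWitness_suggest_overall_approach_py : (List (String × List (String × Int))) :=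
  [("momentum", [("score", 62)]), ("reversal", [("score", 40)])]

def Spec_suggest_overall_approach_py (comparison_result : List (String × List (String × Int))) (out : String) : Prop := out = suggest_overall_approach_py_alt comparison_result
instance (comparison_result : List (String × List (String × Int))) (out : String) : Decidable (Spec_suggest_overall_approach_py comparison_result out) := by unfold Spec_suggest_overall_approach_py; infer_instance

-- ===== CLAIM (what is proved, stated in full; the proofs are below) =====
def Claim_equal_suggest_overall_approach_py : Prop := ∀ (comparison_result : List (String × List (String × Int))), Dom_suggest_overall_approach_py comparison_result → Pre_suggest_overall_approach_py comparison_result → Spec_suggest_overall_approach_py comparison_result (suggest_overall_approach_py comparison_result)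

-- ===== LEMMAS AND PROOFS =====

-- the filtered, score-extracted list both programs effectively traverse
def coreOf (cr : List (String × List (String × Int))) : List (String × Int) :=
  (cr.filter (fun p => p.1 != "overall_analysis")).map (fun p => (p.1, scoreOf p.2))

-- B's step specialized to core entries
def step2 (st : Option (Int × String) × Option Int) (q : String × Int) :
    Option (Int × String) × Option Int :=
  match st with
  | (none, sec) => (some (q.2, q.1), sec)
  | (some (b, bn), sec) =>
    if q.2 > b then (some (q.2, q.1), some b)
    else (some (b, bn), some (match sec with | none => q.2 | some t => max t q.2))

lemma foldl_altStep_eq (cr : List (String × List (String × Int)))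
    (st : Option (Int × String) × Option Int) :
    cr.foldl altStep st = (coreOf cr).foldl step2 st := by
  induction cr generalizing st with
  | nil => rfl
  | cons p t ih =>
    by_cases h : p.1 = "overall_analysis"
    · simp [coreOf, h, altStep, ih]
    · obtain ⟨b?, sec⟩ := st
      cases b? with
      | none =>
        simp [coreOf, h, altStep, step2] at *
        apply ih
      | some bp =>
        obtain ⟨b, bn⟩ := bp
        simp [coreOf, h, altStep, step2] at *
        apply ih

-- invariant relating B's state to the processed list
def BInv (L : List (String × Int)) (st : Option (Int × String) × Option Int) : Prop :=
  match st with
  | (none, sec) => L = [] ∧ sec = none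
  | (some (b, bn), sec) =>
    ∃ L1 L2, L = L1 ++ (bn, b) :: L2 ∧ (∀ q ∈ L1, q.2 < b) ∧ (∀ q ∈ L2, q.2 ≤ b) ∧
      (match sec with
       | none => L1 = [] ∧ L2 = []
       | some s => s ≤ b ∧ (∀ q ∈ L1 ++ L2, q.2 ≤ s) ∧ s ∈ (L1 ++ L2).map Prod.snd)

lemma inv_step {L st} (h : BInv L st) (q : String × Int) : BInv (L ++ [q]) (step2 st q) := by
  obtain ⟨b?, sec⟩ := st
  cases b? with
  | none =>
    obtain ⟨hL, hsec⟩ := h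
    subst hL; subst hsec
    show BInv ([] ++ [q]) (some (q.2, q.1), none)
    simp only [BInv]
    exact ⟨[], [], by simp, by simp, by simp, by simp⟩
  | some bp =>
    obtain ⟨b, bn⟩ := bp
    simp only [BInv] at h
    obtain ⟨L1, L2, hL, h1, h2, hsec⟩ := h
    have hmemall : ∀ r ∈ L, r.2 ≤ b := by
      intro r hr
      rw [hL] at hr
      rcases List.mem_append.mp hr with hr1 | hr2
      · exact le_of_lt (h1 r hr1)
      · rcases List.mem_cons.mp hr2 with rfl | hr3
        · exact le_refl _
        · exact h2 r hr3
    by_cases hq : q.2 > b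
    · have hred : step2 (some (b, bn), sec) q = (some (q.2, q.1), some b) := by
        simp [step2, hq]
      rw [hred]
      simp only [BInv]
      refine ⟨L, [], by simp, ?_, by simp, le_of_lt hq, ?_, ?_⟩
      · intro r hr
        exact lt_of_le_of_lt (hmemall r hr) hq
      · intro r hr
        simp at hr
        exact hmemall r hr
      · rw [hL]
        simp
    · have hle : q.2 ≤ b := not_lt.mp hq
      cases sec with
      | none =>
        obtain ⟨hL1, hL2⟩ := hsec
        subst hL1; subst hL2
        have hred : step2 (some (b, bn), none) q = (some (b, bn), some q.2) := by
          simp only [step2, if_neg hq]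
        rw [hred]
        simp only [BInv]
        exact ⟨[], [q], by simp [hL], by simp, by simpa using hle, hle, by simp, by simp⟩
      | some s =>
        obtain ⟨hsb, hall, hmem⟩ := hsec
        have hred : step2 (some (b, bn), some s) q = (some (b, bn), some (max s q.2)) := by
          simp only [step2, if_neg hq]
        rw [hred]
        simp only [BInv]
        refine ⟨L1, L2 ++ [q], by rw [hL]; simp, h1, ?_, max_le hsb hle, ?_, ?_⟩
        · intro r hr
          rcases List.mem_append.mp hr with hr2 | hrq
          · exact h2 r hr2
          · simp at hrq; subst hrq; exact hle
        · intro r hr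
          rcases List.mem_append.mp hr with hr1 | hr2
          · exact le_trans (hall r (List.mem_append.mpr (Or.inl hr1))) (le_max_left _ _)
          · rcases List.mem_append.mp hr2 with hr2a | hrq
            · exact le_trans (hall r (List.mem_append.mpr (Or.inr hr2a))) (le_max_left _ _)
            · simp at hrq; subst hrq; exact le_max_right _ _
        · rcases le_total q.2 s with hle2 | hge
          · rw [max_eq_left hle2]
            rcases List.mem_map.mp hmem with ⟨r, hr, hrs⟩
            refine List.mem_map.mpr ⟨r, ?_, hrs⟩
            rcases List.mem_append.mp hr with hr1 | hr2
            · exact List.mem_append.mpr (Or.inl hr1)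
            · exact List.mem_append.mpr (Or.inr (List.mem_append.mpr (Or.inl hr2)))
          · rw [max_eq_right hge]
            exact List.mem_map.mpr ⟨q,
              List.mem_append.mpr (Or.inr (List.mem_append.mpr (Or.inr (by simp)))), rfl⟩

lemma inv_foldl (L : List (String × Int)) : BInv L (L.foldl step2 (none, none)) := by
  induction L using List.reverseRecOn with
  | nil => exact ⟨rfl, rfl⟩
  | append_singleton l a ih =>
    rw [List.foldl_append]
    exact inv_step ih a

theorem main_equal (cr : List (String × List (String × Int)))
    (hpre : Pre_suggest_overall_approach_py cr) :
    suggest_overall_approach_py cr = suggest_overall_approach_py_alt cr := by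
  obtain ⟨hnodup, hex, _⟩ := hpre
  -- the dict build in A appends fresh keys: scores.items = coreOf cr
  have hfnodup : ((cr.filter (fun p => p.1 != "overall_analysis")).map Prod.fst).Nodup :=
    hnodup.sublist (List.Sublist.map Prod.fst List.filter_sublist)
  have hitems : ((cr.filter (fun p => p.1 != "overall_analysis")).foldl
      (fun d p => d.insert p.1 (scoreOf p.2)) PySem.Dict.empty).items = coreOf cr := by
    rw [PySem.Dict.items_foldl_insert_fresh _ _ _ _ (by intro a _; rfl) hfnodup]
    rfl
  -- B's fold over cr equals the step2 fold over coreOf cr, characterized by BInv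
  have hB := foldl_altStep_eq cr (none, none)
  have hinv := inv_foldl (coreOf cr)
  rcases hst : (coreOf cr).foldl step2 (none, none) with ⟨b?, sec⟩
  rw [hst] at hinv
  -- coreOf cr is nonempty
  have hLne : coreOf cr ≠ [] := by
    obtain ⟨p, hp, hpn⟩ := hex
    have : (p.1, scoreOf p.2) ∈ coreOf cr :=
      List.mem_map.mpr ⟨p, List.mem_filter.mpr ⟨hp, by simpa using hpn⟩, rfl⟩
    exact List.ne_nil_of_mem this
  cases b? with
  | none =>
    simp only [BInv] at hinv
    exact absurd hinv.1 hLne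
  | some bp =>
    obtain ⟨b, bn⟩ := bp
    simp only [BInv] at hinv
    obtain ⟨L1, L2, hL, h1, h2, hsec⟩ := hinv
    have hmemall : ∀ r ∈ coreOf cr, r.2 ≤ b := by
      intro r hr
      rw [hL] at hr
      rcases List.mem_append.mp hr with hr1 | hr2
      · exact le_of_lt (h1 r hr1)
      · rcases List.mem_cons.mp hr2 with rfl | hr3
        · exact le_refl _
        · exact h2 r hr3
    -- A's max(scores.values()) is exactly b
    have hbmem : b ∈ (coreOf cr).map Prod.snd := by
      rw [hL]; exact List.mem_map.mpr ⟨(bn, b), by simp, rfl⟩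
    have hmax : PySem.List.max? ((coreOf cr).map Prod.snd) (fun v => v) = some b := by
      rcases hm : PySem.List.max? ((coreOf cr).map Prod.snd) (fun v => v) with _ | m
      · rw [PySem.List.max?_eq_none_iff] at hm
        exact absurd (List.map_eq_nil_iff.mp hm) hLne
      · have hmm := PySem.List.max?_mem hm
        have hismax := PySem.List.max?_isMax hm
        have h1m : m ≤ b := by
          rcases List.mem_map.mp hmm with ⟨r, hr, hrm⟩
          rw [← hrm]; exact hmemall r hr
        have h2m : b ≤ m := hismax b hbmem
        rw [le_antisymm h1m h2m]
    -- reduce both sides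
    simp only [suggest_overall_approach_py, suggest_overall_approach_py_alt, hB, hst, hitems,
      PySem.Dict.values, hmax, Option.getD_some]
    by_cases hb : b < 50
    · simp [hb]
    · simp only [if_neg hb]
      have hPmid : (decide (b - 10 ≤ ((bn, b) : String × Int).2)) = true := by
        simp only [decide_eq_true_eq]
        omega
      have hfsplit : (coreOf cr).filter (fun p => decide (b - 10 ≤ p.2)) =
          (L1.filter (fun p => decide (b - 10 ≤ p.2))) ++ (bn, b) ::
          (L2.filter (fun p => decide (b - 10 ≤ p.2))) := by
        rw [hL, List.filter_append, List.filter_cons, if_pos hPmid]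
      cases sec with
      | none =>
        obtain ⟨hL1, hL2⟩ := hsec
        subst hL1; subst hL2
        have hfeq : (coreOf cr).filter (fun p => decide (b - 10 ≤ p.2)) = [(bn, b)] := by
          rw [hfsplit]; simp
        rw [hfeq]
        simp
      | some s =>
        obtain ⟨hsb, hall, hmem⟩ := hsec
        by_cases hs : s < b - 10
        · have e1 : L1.filter (fun p => decide (b - 10 ≤ p.2)) = [] := by
            rw [List.filter_eq_nil_iff]
            intro r hr
            have := hall r (List.mem_append.mpr (Or.inl hr))
            simp; omega
          have e2 : L2.filter (fun p => decide (b - 10 ≤ p.2)) = [] := by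
            rw [List.filter_eq_nil_iff]
            intro r hr
            have := hall r (List.mem_append.mpr (Or.inr hr))
            simp; omega
          have hfeq : (coreOf cr).filter (fun p => decide (b - 10 ≤ p.2)) = [(bn, b)] := by
            rw [hfsplit, e1, e2]; rfl
          rw [hfeq]
          simp [hs]
        · -- a second strategy also scores ≥ b - 10: the high list has ≥ 2 entries
          rcases List.mem_map.mp hmem with ⟨r, hr, hrs⟩
          have hPr : (decide (b - 10 ≤ r.2)) = true := by simp; omega
          have hlen : 2 ≤ ((coreOf cr).filter (fun p => decide (b - 10 ≤ p.2))).length := by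
            rw [hfsplit]
            rcases List.mem_append.mp hr with hr1 | hr2
            · have hm : r ∈ L1.filter (fun p => decide (b - 10 ≤ p.2)) :=
                List.mem_filter.mpr ⟨hr1, hPr⟩
              have := List.length_pos_of_mem hm
              simp only [List.length_append, List.length_cons]
              omega
            · have hm : r ∈ L2.filter (fun p => decide (b - 10 ≤ p.2)) :=
                List.mem_filter.mpr ⟨hr2, hPr⟩
              have := List.length_pos_of_mem hm
              simp only [List.length_append, List.length_cons]
              omega
          have hcond : ((((coreOf cr).filter (fun p => decide (b - 10 ≤ p.2))).map Prod.fst).length == 1) = false := by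
            simp only [beq_eq_false_iff_ne, ne_eq, List.length_map]
            omega
          have hbs : (decide (s < b - 10)) = false := by simp [hs]
          rw [hcond]
          simp [hbs]

-- ===== VERDICT (by name: the statement is the Claim_ definition above) =====
theorem suggest_overall_approach_py_spec : Claim_equal_suggest_overall_approach_py := by
  intro cr _ hpre
  exact main_equal cr hpre
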